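-- pv_equiv track=rewrite | github.com/OonXiangYu/Python_GoChess | Python_GoChess/FirstName_LastName_StudentNumber_Project/code/board.py | checkMultipleArrWinning
-- ===== SOURCE A (Python) =====
-- def checkMultipleArrWinning(boardArray):
--     def dfs(x, y, group):
--         if x < 0 or y < 0 or x >= len(boardArray) or y >= len(boardArray[0]) or boardArray[x][y] != 0:
--             return
--         boardArray[x][y] = -1  # Mark as visited
--         group.append([x, y])
--
--         # Explore all 4 directions
--         dfs(x + 1, y, group)
--         dfs(x - 1, y, group)
--         dfs(x, y + 1, group)
--         dfs(x, y - 1, group)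
--
--     groups = []  # a big arr to store all the group
--     for x in range(len(boardArray)):
--         for y in range(len(boardArray[0])):
--             if boardArray[x][y] == 0:  # Start DFS at the first index found
--                 group = []
--                 dfs(x, y, group)
--                 groups.append(group)
--
--     return groups
-- ===== SOURCE B (Python) =====
-- def checkMultipleArrWinning(boardArray):
--     rows = len(boardArray)
--     cols = len(boardArray[0]) if boardArray else 0
--     # collect the coordinates of all empty cells once; membership in this set
--     # replaces both the bounds check and the value/visited check of the scan
--     zeros = {(x, y) for x in range(rows) for y in range(cols) if boardArray[x][y] == 0}
--     groups = []
--     for x in range(rows):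
--         for y in range(cols):
--             if (x, y) in zeros:
--                 group = []
--                 stack = [(x, y)]
--                 while stack:
--                     c = stack.pop()
--                     if c in zeros:
--                         zeros.discard(c)
--                         cx, cy = c
--                         group.append([cx, cy])
--                         stack += [(cx, cy - 1), (cx, cy + 1), (cx - 1, cy), (cx + 1, cy)]
--                 groups.append(group)
--     return groups
-- ===== Notes on version B (the rewrite author's own statement) =====
-- stated objective: alternative
-- what changed: B first collects the coordinates of all empty cells into a set and flood-fills by popping a worklist and testing set membership (discarding visited cells from the set), so the board is never mutated and no bounds/value check on the board is needed, instead of A's recursive dfs that marks cells -1 in the board.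
import Mathlib
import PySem

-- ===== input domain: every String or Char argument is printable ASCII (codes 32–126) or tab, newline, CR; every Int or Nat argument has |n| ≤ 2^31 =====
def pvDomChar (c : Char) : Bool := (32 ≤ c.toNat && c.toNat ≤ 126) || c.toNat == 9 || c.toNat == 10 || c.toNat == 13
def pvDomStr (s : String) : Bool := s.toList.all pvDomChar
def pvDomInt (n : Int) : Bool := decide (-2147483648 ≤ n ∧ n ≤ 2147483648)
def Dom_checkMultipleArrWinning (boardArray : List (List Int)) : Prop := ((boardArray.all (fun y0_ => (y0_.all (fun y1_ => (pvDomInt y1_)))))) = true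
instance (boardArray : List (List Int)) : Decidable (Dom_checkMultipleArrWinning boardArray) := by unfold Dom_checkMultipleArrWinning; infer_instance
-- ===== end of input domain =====

-- B collects the empty-cell coordinates into a set once and flood-fills by popping a worklist
-- and testing/discarding set membership instead of A's recursive dfs that marks the board:
-- an alternative algorithm of identical cost. Python A mutates boardArray in place (zeros become
-- -1) while B does not; the equivalence proved here is about the return value only.


-- ===== PORT A =====
-- boardArray[x][y] and the in-place write boardArray[x][y] = -1
def pvCell (b : List (List Int)) (x y : Int) : Option Int :=
  (PySem.List.pyGet? b x).bind (fun r => PySem.List.pyGet? r y)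

def pvMark (b : List (List Int)) (x y : Int) : List (List Int) :=
  match PySem.List.pyGet? b x with
  | some r => b.set x.toNat (r.set y.toNat (-1))
  | none => b

-- number of zero cells, used only as the totality fuel of A's recursion
def pvZ (b : List (List Int)) : Nat := (b.map (fun r => r.countP (fun v => v == 0))).sum

-- the recursive dfs of A on the state (board, group); fuel is only a totality guard
-- (each recursive level below a non-returning call consumes one zero cell)
def dfsA (R C : Int) : Nat → Int → Int → (List (List Int) × List (List Int)) →
    (List (List Int) × List (List Int))
  | 0, _, _, s => s
  | f+1, x, y, s =>
    if x < 0 ∨ y < 0 ∨ R ≤ x ∨ C ≤ y ∨ pvCell s.1 x y ≠ some 0 then s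
    else
      dfsA R C f x (y-1) (dfsA R C f x (y+1) (dfsA R C f (x-1) y
        (dfsA R C f (x+1) y (pvMark s.1 x y, s.2 ++ [[x, y]]))))

def checkMultipleArrWinning (boardArray : List (List Int)) : List (List (List Int)) :=
  let R : Int := boardArray.length
  let C : Int := (boardArray.headD []).length
  ((PySem.List.pyRange 0 R 1).foldl (fun st x =>
      (PySem.List.pyRange 0 C 1).foldl (fun st y =>
        if pvCell st.1 x y = some 0 then
          let r := dfsA R C (pvZ st.1 + 1) x y (st.1, [])
          (r.1, st.2 ++ [r.2])
        else st) st)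
    (boardArray, [])).2

-- ===== PORT B =====
-- the set comprehension: coordinates of all empty cells
def pvZeros (b : List (List Int)) : PySem.Set (Int × Int) :=
  PySem.Set.ofList ((PySem.List.pyRange 0 b.length 1).flatMap (fun x =>
    (PySem.List.pyRange 0 (b.headD []).length 1).filterMap (fun y =>
      if (PySem.List.pyGet? b x).bind (fun r => PySem.List.pyGet? r y) = some 0
      then some (x, y) else none)))

-- the while loop of B: pop a cell; if it is still in the zeros set, remove it, record it and
-- push its four neighbours; fuel is only a totality guard (each hit shrinks the set)
def floodB : Nat → List (Int × Int) → PySem.Set (Int × Int) → List (List Int) →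
    (PySem.Set (Int × Int) × List (List Int))
  | _, [], z, g => (z, g)
  | 0, _ :: _, z, g => (z, g)
  | f+1, c :: rest, z, g =>
    if PySem.Set.contains z c then
      floodB f ((c.1 + 1, c.2) :: (c.1 - 1, c.2) :: (c.1, c.2 + 1) :: (c.1, c.2 - 1) :: rest)
        (PySem.Set.discard z c) (g ++ [[c.1, c.2]])
    else floodB f rest z g

def checkMultipleArrWinning_alt (boardArray : List (List Int)) : List (List (List Int)) :=
  let rows : Int := boardArray.length
  let cols : Int := (boardArray.headD []).length
  ((PySem.List.pyRange 0 rows 1).foldl (fun st x =>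
      (PySem.List.pyRange 0 cols 1).foldl (fun st y =>
        if PySem.Set.contains st.1 (x, y) then
          let r := floodB (1 + 5 * st.1.length) [(x, y)] st.1 []
          (r.1, st.2 ++ [r.2])
        else st) st)
    (pvZeros boardArray, [])).2

-- ===== PRECONDITION & SPEC =====
-- Pre_ excludes ragged boards with a row shorter than the first row: there the scan (or the
-- flood fill) indexes past that row's end and Python's A raises IndexError.
def Pre_checkMultipleArrWinning (boardArray : List (List Int)) : Prop :=
  ∀ r ∈ boardArray, (boardArray.headD []).length ≤ r.length
instance (boardArray : List (List Int)) : Decidable (Pre_checkMultipleArrWinning boardArray) := by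
  unfold Pre_checkMultipleArrWinning; infer_instance

def pvWitness_checkMultipleArrWinning : List (List Int) := [[0, 1], [1, 0]]

def Spec_checkMultipleArrWinning (boardArray : List (List Int)) (out : List (List (List Int))) : Prop := out = checkMultipleArrWinning_alt boardArray
instance (boardArray : List (List Int)) (out : List (List (List Int))) : Decidable (Spec_checkMultipleArrWinning boardArray out) := by unfold Spec_checkMultipleArrWinning; infer_instance

-- ===== CLAIM (what is proved, stated in full; the proofs are below) =====
def Claim_equal_checkMultipleArrWinning : Prop := ∀ (boardArray : List (List Int)), Dom_checkMultipleArrWinning boardArray → Pre_checkMultipleArrWinning boardArray → Spec_checkMultipleArrWinning boardArray (checkMultipleArrWinning boardArray)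

-- ===== LEMMAS AND PROOFS =====

-- A's stack-machine presentation of dfs, used only inside the proof to mediate between
-- the recursion of A and the set-based worklist of B
def stackB (R C : Int) : Nat → List (Int × Int) → (List (List Int) × List (List Int)) →
    (List (List Int) × List (List Int))
  | _, [], s => s
  | 0, _ :: _, s => s
  | f+1, (x, y) :: rest, s =>
    if x < 0 ∨ y < 0 ∨ R ≤ x ∨ C ≤ y ∨ pvCell s.1 x y ≠ some 0 then stackB R C f rest s
    else stackB R C f ((x+1, y) :: (x-1, y) :: (x, y+1) :: (x, y-1) :: rest)
      (pvMark s.1 x y, s.2 ++ [[x, y]])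

-- the coupling invariant: z is exactly the set of in-range cells of b holding 0
def pvInv (R C : Int) (b : List (List Int)) (z : PySem.Set (Int × Int)) : Prop :=
  (∀ p ∈ z, 0 ≤ p.1 ∧ p.1 < R ∧ 0 ≤ p.2 ∧ p.2 < C) ∧
  (∀ x y : Int, 0 ≤ x → x < R → 0 ≤ y → y < C →
    ((x, y) ∈ z ↔ pvCell b x y = some 0))

-- writing -1 over a 0 strictly decreases the row's zero count
theorem countP_set_lt (l : List Int) (i : Nat) (h : l[i]? = some 0) :
    (l.set i (-1)).countP (fun v => v == 0) < l.countP (fun v => v == 0) := by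
  induction l generalizing i with
  | nil => simp at h
  | cons a t ih =>
    cases i with
    | zero =>
      simp at h; subst h
      simp
    | succ j =>
      simp at h
      have := ih j h
      simp only [List.set_cons_succ, List.countP_cons]
      omega

-- the board-level write on Nat indices strictly decreases the zero count
theorem pvZ_set_lt (b : List (List Int)) (i j : Nat) (r : List Int)
    (hrx : b[i]? = some r) (hry : r[j]? = some 0) :
    pvZ (b.set i (r.set j (-1))) < pvZ b := by
  unfold pvZ
  induction b generalizing i with
  | nil => simp at hrx
  | cons hd t ih =>
    cases i with
    | zero =>
      simp at hrx; subst hrx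
      simp only [List.set_cons_zero, List.map_cons, List.sum_cons]
      have := countP_set_lt hd j hry
      omega
    | succ k =>
      simp at hrx
      have := ih k hrx
      simp only [List.set_cons_succ, List.map_cons, List.sum_cons]
      omega

-- marking an in-bounds zero cell strictly decreases the board's zero count
theorem pvZ_mark_lt (b : List (List Int)) (x y : Int)
    (hx : 0 ≤ x) (hy : 0 ≤ y) (h : pvCell b x y = some 0) :
    pvZ (pvMark b x y) < pvZ b := by
  unfold pvCell at h
  cases hr : PySem.List.pyGet? b x with
  | none => simp [hr] at h
  | some r =>
    rw [hr] at h; simp only [Option.bind_some] at h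
    have hrx : b[x.toNat]? = some r := by
      rw [PySem.List.pyGet?_of_nonneg b hx] at hr; exact hr
    have hry : r[y.toNat]? = some 0 := by
      rw [PySem.List.pyGet?_of_nonneg r hy] at h; exact h
    unfold pvMark
    rw [hr]
    exact pvZ_set_lt b x.toNat y.toNat r hrx hry

-- dfsA never increases the zero count
theorem dfsA_z_le (R C : Int) (f : Nat) :
    ∀ (x y : Int) (s : List (List Int) × List (List Int)), pvZ (dfsA R C f x y s).1 ≤ pvZ s.1 := by
  induction f with
  | zero => intro x y s; simp [dfsA]
  | succ f ih =>
    intro x y s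
    rw [dfsA]
    split
    · exact le_refl _
    · next hguard =>
      push_neg at hguard
      obtain ⟨hx, hy, _, _, hc⟩ := hguard
      have hm := pvZ_mark_lt s.1 x y hx hy (by simpa using hc)
      calc pvZ (dfsA R C f x (y-1) _).1 ≤ _ := ih _ _ _
        _ ≤ _ := ih _ _ _
        _ ≤ _ := ih _ _ _
        _ ≤ _ := ih _ _ _
        _ ≤ pvZ s.1 := le_of_lt hm

-- fuel irrelevance for stackB
theorem stackB_fuel (R C : Int) (f : Nat) :
    ∀ (f' : Nat) (stack : List (Int × Int)) (s : List (List Int) × List (List Int)),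
      stack.length + 5 * pvZ s.1 ≤ f → stack.length + 5 * pvZ s.1 ≤ f' →
      stackB R C f stack s = stackB R C f' stack s := by
  induction f with
  | zero =>
    intro f' stack s h _
    cases stack with
    | nil => cases f' <;> rfl
    | cons p rest => simp at h
  | succ f ih =>
    intro f' stack s h h'
    cases stack with
    | nil => cases f' <;> rfl
    | cons p rest =>
      obtain ⟨x, y⟩ := p
      cases f' with
      | zero => simp at h'
      | succ f' =>
        rw [stackB, stackB]
        simp only [List.length_cons] at h h'
        split
        · exact ih f' rest s (by omega) (by omega)
        · next hguard =>
          push_neg at hguard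
          obtain ⟨hx, hy, _, _, hc⟩ := hguard
          have hm := pvZ_mark_lt s.1 x y hx hy (by simpa using hc)
          set s0 : List (List Int) × List (List Int) := (pvMark s.1 x y, s.2 ++ [[x, y]]) with hs0
          exact ih f' _ s0 (by simp only [hs0, List.length_cons]; omega)
            (by simp only [hs0, List.length_cons]; omega)

-- the stack machine simulates one dfs call on the top of the stack
theorem stackB_sim (R C : Int) (f1 : Nat) :
    ∀ (f2 : Nat) (x y : Int) (rest : List (Int × Int)) (s : List (List Int) × List (List Int)),
      pvZ s.1 < f1 → 1 + rest.length + 5 * pvZ s.1 ≤ f2 →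
      stackB R C f2 ((x, y) :: rest) s = stackB R C (f2 - 1) rest (dfsA R C f1 x y s) := by
  induction f1 with
  | zero => intro _ _ _ _ _ h; omega
  | succ f1 ih =>
    intro f2 x y rest s h1 h2
    cases f2 with
    | zero => omega
    | succ f2 =>
      rw [stackB, dfsA]
      split
      · simp
      · next hguard =>
        push_neg at hguard
        obtain ⟨hx, hy, _, _, hc⟩ := hguard
        have hm := pvZ_mark_lt s.1 x y hx hy (by simpa using hc)
        set s0 : List (List Int) × List (List Int) := (pvMark s.1 x y, s.2 ++ [[x, y]]) with hs0
        have hz0 : pvZ s0.1 = pvZ (pvMark s.1 x y) := rfl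
        rw [ih f2 (x+1) y _ s0 (by omega) (by simp only [List.length_cons]; omega)]
        have z1 := dfsA_z_le R C f1 (x+1) y s0
        rw [ih (f2 - 1) (x-1) y _ _ (by omega) (by simp only [List.length_cons]; omega)]
        have z2 := dfsA_z_le R C f1 (x-1) y (dfsA R C f1 (x+1) y s0)
        rw [ih (f2 - 1 - 1) x (y+1) _ _ (by omega) (by simp only [List.length_cons]; omega)]
        have z3 := dfsA_z_le R C f1 x (y+1) (dfsA R C f1 (x-1) y (dfsA R C f1 (x+1) y s0))
        rw [ih (f2 - 1 - 1 - 1) x (y-1) rest _ (by omega) (by omega)]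
        have z4 := dfsA_z_le R C f1 x (y-1)
          (dfsA R C f1 x (y+1) (dfsA R C f1 (x-1) y (dfsA R C f1 (x+1) y s0)))
        exact stackB_fuel R C _ _ rest _ (by omega) (by omega)

-- per-cell: the whole stack run equals the whole dfs run
theorem stackB_eq_dfsA (R C : Int) (x y : Int) (b : List (List Int)) :
    stackB R C (1 + 5 * pvZ b) [(x, y)] (b, []) = dfsA R C (pvZ b + 1) x y (b, []) := by
  have hz : pvZ ((b, []) : List (List Int) × List (List Int)).1 = pvZ b := rfl
  rw [stackB_sim R C (pvZ b + 1) (1 + 5 * pvZ b) x y [] (b, []) (by omega) (by simp only [List.length_nil]; omega)]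
  cases h : (1 + 5 * pvZ b - 1) <;> rfl

-- reading any cell of the board after the write boardArray[x][y] = -1
theorem pvCell_mark (b : List (List Int)) (x y x' y' : Int)
    (hx : 0 ≤ x) (hy : 0 ≤ y) (hx' : 0 ≤ x') (hy' : 0 ≤ y') (h : pvCell b x y = some 0) :
    pvCell (pvMark b x y) x' y' =
      if x' = x ∧ y' = y then some (-1) else pvCell b x' y' := by
  unfold pvCell at h
  rw [PySem.List.pyGet?_of_nonneg b hx] at h
  cases hr : b[x.toNat]? with
  | none => rw [hr] at h; simp at h
  | some r =>
    rw [hr] at h; simp only [Option.bind_some] at h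
    rw [PySem.List.pyGet?_of_nonneg r hy] at h
    have hxlen : x.toNat < b.length := (List.getElem?_eq_some_iff.mp hr).1
    have hylen : y.toNat < r.length := (List.getElem?_eq_some_iff.mp h).1
    have hb : pvMark b x y = b.set x.toNat (r.set y.toNat (-1)) := by
      unfold pvMark
      rw [PySem.List.pyGet?_of_nonneg b hx, hr]
    unfold pvCell
    rw [hb, PySem.List.pyGet?_of_nonneg _ hx', PySem.List.pyGet?_of_nonneg b hx']
    by_cases hxx : x' = x
    · subst hxx
      rw [List.getElem?_set_self (by omega), hr]
      simp only [Option.bind_some]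
      rw [PySem.List.pyGet?_of_nonneg _ hy', PySem.List.pyGet?_of_nonneg r hy']
      by_cases hyy : y' = y
      · subst hyy
        rw [List.getElem?_set_self (by omega)]
        simp
      · have hne : y.toNat ≠ y'.toNat := fun hc => hyy (by omega)
        rw [List.getElem?_set_ne hne]
        simp [hyy]
    · have hne : x.toNat ≠ x'.toNat := fun hc => hxx (by omega)
      rw [List.getElem?_set_ne hne]
      simp [hxx]

-- the guard of A's machine and B's set-membership test agree under the invariant
theorem guard_equiv (R C : Int) (b : List (List Int)) (z : PySem.Set (Int × Int))
    (hi : pvInv R C b z) (x y : Int) :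
    PySem.Set.contains z (x, y) = true ↔
      ¬ (x < 0 ∨ y < 0 ∨ R ≤ x ∨ C ≤ y ∨ pvCell b x y ≠ some 0) := by
  rw [PySem.Set.contains_iff z (x, y)]
  obtain ⟨hrange, hiff⟩ := hi
  constructor
  · intro hm
    obtain ⟨h1, h2, h3, h4⟩ := hrange _ hm
    push_neg
    exact ⟨by omega, by omega, by omega, by omega,
      (hiff x y (by omega) (by omega) (by omega) (by omega)).mp hm⟩
  · intro hg
    push_neg at hg
    obtain ⟨h1, h2, h3, h4, h5⟩ := hg
    exact (hiff x y h1 (by omega) h2 (by omega)).mpr h5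

-- removing the visited cell from the set matches marking it -1 on the board
theorem pvInv_step (R C : Int) (b : List (List Int)) (z : PySem.Set (Int × Int))
    (hi : pvInv R C b z) (x y : Int) (hm : (x, y) ∈ z) :
    pvInv R C (pvMark b x y) (PySem.Set.discard z (x, y)) := by
  obtain ⟨hrange, hiff⟩ := hi
  obtain ⟨hx0, hxR, hy0, hyC⟩ := hrange _ hm
  have hc : pvCell b x y = some 0 := (hiff x y hx0 hxR hy0 hyC).mp hm
  constructor
  · intro p hp
    exact hrange p ((PySem.Set.mem_discard z (x, y) p).mp hp).1
  · intro x' y' hx' hx'R hy' hy'C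
    rw [PySem.Set.mem_discard, pvCell_mark b x y x' y' hx0 hy0 hx' hy' hc]
    by_cases hpq : x' = x ∧ y' = y
    · obtain ⟨h1, h2⟩ := hpq; subst h1; subst h2
      simp
    · have hne : (x', y') ≠ (x, y) := by
        intro hc'; exact hpq ⟨congrArg Prod.fst hc', congrArg Prod.snd hc'⟩
      simp only [if_neg hpq]
      rw [hiff x' y' hx' hx'R hy' hy'C]
      simp [hne]
  
-- removing at least one occurrence shrinks a filtered list
theorem filter_length_lt {p : Int × Int → Bool} {x : Int × Int} :
    ∀ (l : List (Int × Int)), x ∈ l → p x = false → (l.filter p).length < l.length := by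
  intro l
  induction l with
  | nil => intro h; simp at h
  | cons a t ih =>
    intro hmem hpx
    rcases List.mem_cons.mp hmem with h | h
    · subst h
      rw [List.filter_cons_of_neg (by simp [hpx])]
      have := List.length_filter_le p t
      simp only [List.length_cons]
      omega
    · have := ih h hpx
      cases hpa : p a with
      | true => rw [List.filter_cons_of_pos hpa]; simpa using this
      | false => rw [List.filter_cons_of_neg (by simp [hpa])]; simp only [List.length_cons]; omega

-- discarding a member strictly shrinks the set
theorem discard_length_lt (z : PySem.Set (Int × Int)) (c : Int × Int) (hc : c ∈ z) :
    (PySem.Set.discard z c).length < z.length := by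
  exact filter_length_lt z hc (by simp)

-- fuel irrelevance for floodB
theorem floodB_fuel (f : Nat) :
    ∀ (f' : Nat) (stack : List (Int × Int)) (z : PySem.Set (Int × Int)) (g : List (List Int)),
      stack.length + 5 * z.length ≤ f → stack.length + 5 * z.length ≤ f' →
      floodB f stack z g = floodB f' stack z g := by
  induction f with
  | zero =>
    intro f' stack z g h _
    cases stack with
    | nil => cases f' <;> rfl
    | cons p rest => simp at h
  | succ f ih =>
    intro f' stack z g h h'
    cases stack with
    | nil => cases f' <;> rfl
    | cons c rest =>
      cases f' with
      | zero => simp at h'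
      | succ f' =>
        rw [floodB, floodB]
        simp only [List.length_cons] at h h'
        split
        · next hc =>
          have hm : c ∈ z := (PySem.Set.contains_iff z c).mp hc
          have hlt := discard_length_lt z c hm
          exact ih f' _ _ _ (by simp only [List.length_cons]; omega)
            (by simp only [List.length_cons]; omega)
        · exact ih f' rest z g (by omega) (by omega)

-- lockstep simulation: with the SAME fuel, B's set worklist and A's board stack machine
-- produce the same group and re-establish the invariant
theorem flood_sim (R C : Int) (f : Nat) :
    ∀ (stack : List (Int × Int)) (z : PySem.Set (Int × Int)) (g : List (List Int))
      (b : List (List Int)),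
      pvInv R C b z →
      (floodB f stack z g).2 = (stackB R C f stack (b, g)).2 ∧
        pvInv R C (stackB R C f stack (b, g)).1 (floodB f stack z g).1 := by
  induction f with
  | zero =>
    intro stack z g b hi
    cases stack with
    | nil => exact ⟨rfl, hi⟩
    | cons c rest => exact ⟨rfl, hi⟩
  | succ f ih =>
    intro stack z g b hi
    cases stack with
    | nil => exact ⟨rfl, hi⟩
    | cons c rest =>
      obtain ⟨x, y⟩ := c
      rw [floodB, stackB]
      by_cases hc : PySem.Set.contains z (x, y) = true
      · have hguard := (guard_equiv R C b z hi x y).mp hc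
        have hm : (x, y) ∈ z := (PySem.Set.contains_iff z (x, y)).mp hc
        rw [if_pos hc, if_neg hguard]
        exact ih _ _ _ _ (pvInv_step R C b z hi x y hm)
      · have hguard : (x < 0 ∨ y < 0 ∨ R ≤ x ∨ C ≤ y ∨ pvCell b x y ≠ some 0) := by
          by_contra hng
          exact hc ((guard_equiv R C b z hi x y).mpr hng)
        rw [if_neg hc, if_pos hguard]
        exact ih rest z g b hi

-- per-cell: B's flood fill (with its own fuel) equals A's dfs, and the invariant survives
theorem flood_eq_dfs (R C : Int) (b : List (List Int)) (z : PySem.Set (Int × Int))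
    (hi : pvInv R C b z) (x y : Int) :
    (floodB (1 + 5 * z.length) [(x, y)] z []).2 = (dfsA R C (pvZ b + 1) x y (b, [])).2 ∧
      pvInv R C (dfsA R C (pvZ b + 1) x y (b, [])).1
        (floodB (1 + 5 * z.length) [(x, y)] z []).1 := by
  set F := 1 + 5 * z.length + 5 * pvZ b with hF
  have hfl : floodB (1 + 5 * z.length) [(x, y)] z [] = floodB F [(x, y)] z [] :=
    floodB_fuel _ F [(x, y)] z [] (by simp only [List.length_cons, List.length_nil]; omega)
      (by simp only [List.length_cons, List.length_nil]; omega)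
  have hst : stackB R C F [(x, y)] (b, []) = stackB R C (1 + 5 * pvZ b) [(x, y)] (b, []) :=
    stackB_fuel R C F _ [(x, y)] (b, []) (by simp only [List.length_cons, List.length_nil]; omega)
      (by simp only [List.length_cons, List.length_nil]; omega)
  have hsim := flood_sim R C F [(x, y)] z [] b hi
  rw [hfl, ← stackB_eq_dfsA R C x y b, ← hst]
  exact hsim

-- inner fold over the column indices
theorem inner_fold (R C : Int) (x : Int) (hx0 : 0 ≤ x) (hxR : x < R) :
    ∀ (ys : List Int), (∀ y ∈ ys, 0 ≤ y ∧ y < C) →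
    ∀ (b : List (List Int)) (z : PySem.Set (Int × Int)) (gs : List (List (List Int))),
      pvInv R C b z →
      (ys.foldl (fun st y =>
          if pvCell st.1 x y = some 0 then
            let r := dfsA R C (pvZ st.1 + 1) x y (st.1, [])
            (r.1, st.2 ++ [r.2])
          else st) (b, gs)).2 =
        (ys.foldl (fun st y =>
          if PySem.Set.contains st.1 (x, y) then
            let r := floodB (1 + 5 * st.1.length) [(x, y)] st.1 []
            (r.1, st.2 ++ [r.2])
          else st) (z, gs)).2 ∧
      pvInv R C
        (ys.foldl (fun st y =>
          if pvCell st.1 x y = some 0 then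
            let r := dfsA R C (pvZ st.1 + 1) x y (st.1, [])
            (r.1, st.2 ++ [r.2])
          else st) (b, gs)).1
        (ys.foldl (fun st y =>
          if PySem.Set.contains st.1 (x, y) then
            let r := floodB (1 + 5 * st.1.length) [(x, y)] st.1 []
            (r.1, st.2 ++ [r.2])
          else st) (z, gs)).1 := by
  intro ys
  induction ys with
  | nil => intro _ b z gs hi; exact ⟨rfl, hi⟩
  | cons y ys ih =>
    intro hbnd b z gs hi
    simp only [List.foldl_cons]
    by_cases hc : PySem.Set.contains z (x, y) = true
    · have hguard := (guard_equiv R C b z hi x y).mp hc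
      push_neg at hguard
      obtain ⟨_, _, _, _, hcell⟩ := hguard
      rw [if_pos hcell, if_pos hc]
      obtain ⟨hgrp, hinv⟩ := flood_eq_dfs R C b z hi x y
      rw [hgrp]
      exact ih (fun y hy => hbnd y (List.mem_cons_of_mem _ hy)) _ _ _ hinv
    · have hcell : ¬ pvCell b x y = some 0 := by
        intro hcc
        obtain ⟨hy0, hyC⟩ := hbnd y List.mem_cons_self
        exact hc ((guard_equiv R C b z hi x y).mpr
          (by push_neg; exact ⟨hx0, hy0, hxR, hyC, hcc⟩))
      rw [if_neg hcell, if_neg hc]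
      exact ih (fun y hy => hbnd y (List.mem_cons_of_mem _ hy)) b z gs hi

-- outer fold over the row indices
theorem outer_fold (R C : Int) (ys : List Int) (hys : ∀ y ∈ ys, 0 ≤ y ∧ y < C) :
    ∀ (xs : List Int), (∀ x ∈ xs, 0 ≤ x ∧ x < R) →
    ∀ (b : List (List Int)) (z : PySem.Set (Int × Int)) (gs : List (List (List Int))),
      pvInv R C b z →
      (xs.foldl (fun st x => ys.foldl (fun st y =>
          if pvCell st.1 x y = some 0 then
            let r := dfsA R C (pvZ st.1 + 1) x y (st.1, [])
            (r.1, st.2 ++ [r.2])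
          else st) st) (b, gs)).2 =
        (xs.foldl (fun st x => ys.foldl (fun st y =>
          if PySem.Set.contains st.1 (x, y) then
            let r := floodB (1 + 5 * st.1.length) [(x, y)] st.1 []
            (r.1, st.2 ++ [r.2])
          else st) st) (z, gs)).2 := by
  intro xs
  induction xs with
  | nil => intro _ b z gs _; rfl
  | cons x xs ih =>
    intro hbnd b z gs hi
    simp only [List.foldl_cons]
    obtain ⟨hx0, hxR⟩ := hbnd x List.mem_cons_self
    obtain ⟨hgrp, hinv⟩ := inner_fold R C x hx0 hxR ys hys b z gs hi
    set A1 := ys.foldl (fun st y =>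
      if pvCell st.1 x y = some 0 then
        let r := dfsA R C (pvZ st.1 + 1) x y (st.1, [])
        (r.1, st.2 ++ [r.2])
      else st) (b, gs) with hA1
    set B1 := ys.foldl (fun st y =>
      if PySem.Set.contains st.1 (x, y) then
        let r := floodB (1 + 5 * st.1.length) [(x, y)] st.1 []
        (r.1, st.2 ++ [r.2])
      else st) (z, gs) with hB1
    have h1 : A1 = (A1.1, A1.2) := rfl
    have h2 : B1 = (B1.1, B1.2) := rfl
    rw [h1, h2, hgrp]
    exact ih (fun x hx => hbnd x (List.mem_cons_of_mem _ hx)) A1.1 B1.1 B1.2 hinv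

-- membership in the zeros set, unfolded
theorem mem_pvZeros (b : List (List Int)) (p : Int × Int) :
    p ∈ pvZeros b ↔
      0 ≤ p.1 ∧ p.1 < (b.length : Int) ∧ 0 ≤ p.2 ∧ p.2 < ((b.headD []).length : Int) ∧
        pvCell b p.1 p.2 = some 0 := by
  obtain ⟨x, y⟩ := p
  unfold pvZeros
  rw [PySem.Set.mem_ofList, List.mem_flatMap]
  constructor
  · rintro ⟨x', hx', hy⟩
    rw [List.mem_filterMap] at hy
    obtain ⟨y', hy', hsome⟩ := hy
    rw [PySem.List.mem_pyRange_one] at hx' hy'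
    by_cases hcell : (PySem.List.pyGet? b x').bind (fun r => PySem.List.pyGet? r y') = some 0
    · rw [if_pos hcell] at hsome
      obtain ⟨h1, h2⟩ := Prod.mk.injEq .. ▸ (Option.some.injEq .. ▸ hsome)
      subst h1; subst h2
      exact ⟨hx'.1, hx'.2, hy'.1, hy'.2, hcell⟩
    · rw [if_neg hcell] at hsome; exact absurd hsome (by simp)
  · rintro ⟨h1, h2, h3, h4, h5⟩
    refine ⟨x, PySem.List.mem_pyRange_one.mpr ⟨h1, h2⟩, ?_⟩
    rw [List.mem_filterMap]
    refine ⟨y, PySem.List.mem_pyRange_one.mpr ⟨h3, h4⟩, ?_⟩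
    have h5' : ((PySem.List.pyGet? b x).bind fun r => PySem.List.pyGet? r y) = some 0 := h5
    rw [if_pos h5']

-- the invariant holds initially
theorem pvInv_init (b : List (List Int)) :
    pvInv (b.length : Int) ((b.headD []).length : Int) b (pvZeros b) := by
  constructor
  · intro p hp
    obtain ⟨h1, h2, h3, h4, _⟩ := (mem_pvZeros b p).mp hp
    exact ⟨h1, h2, h3, h4⟩
  · intro x y hx hxR hy hyC
    rw [mem_pvZeros]
    constructor
    · rintro ⟨_, _, _, _, h⟩; exact h
    · intro h; exact ⟨hx, hxR, hy, hyC, h⟩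

-- ===== VERDICT (by name: the statement is the Claim_ definition above) =====
theorem checkMultipleArrWinning_spec : Claim_equal_checkMultipleArrWinning := by
  intro boardArray _ _
  unfold Spec_checkMultipleArrWinning checkMultipleArrWinning checkMultipleArrWinning_alt
  exact outer_fold (boardArray.length : Int) ((boardArray.headD []).length : Int)
    (PySem.List.pyRange 0 ((boardArray.headD []).length : Int) 1)
    (fun y hy => PySem.List.mem_pyRange_one.mp hy)
    (PySem.List.pyRange 0 (boardArray.length : Int) 1)
    (fun x hx => PySem.List.mem_pyRange_one.mp hx)
    boardArray (pvZeros boardArray) [] (pvInv_init boardArray)
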